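-- pv_equiv track=rewrite | github.com/fbchh/likou_alg | code_sx_string6.py | pre_deal
-- ===== SOURCE A (Python) =====
-- def pre_deal(s):
--     """
--     前缀表实现，这是没有参考算法随想录关于前缀表的实现思想前的实现，可以看到，处理思想是左指针相向移动，而随想录官方的思想是同时向后遍历
--     :param s: xx
--     :return: xx
--     """
--     s = list(s)
--     _res = [0] * len(s)
--     for i in range(1, len(s)):
--         _count = 0
--         _sub = s[:i+1]
--         l = 0
--         r = len(_sub) - 1
--         while l < len(_sub) - 1:
--             if _sub[:l+1] == _sub[r:]:
--                 _count += 1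
--                 l += 1
--                 r -= 1
--             else:
--                 break
--         _res[i] = _count
--     return _res
-- ===== SOURCE B (Python) =====
-- def pre_deal(s):
--     n = len(s)
--     # lcp[p] = length of the longest common prefix of s and s[p:], computed once
--     lcp = []
--     for p in range(n):
--         t = 0
--         while p + t < n and s[t] == s[p + t]:
--             t += 1
--         lcp.append(t)
--     res = [0] * n
--     for i in range(1, n):
--         # count consecutive k = 1, 2, ... (k <= i) with s[:k] == s[i+1-k:i+1],
--         # i.e. lcp[i+1-k] >= k: an O(1) check per k instead of a slice comparison
--         k = 1
--         while k <= i and lcp[i + 1 - k] >= k: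
--             k += 1
--         res[i] = k - 1
--     return res
-- ===== Notes on version B (the rewrite author's own statement) =====
-- stated objective: faster
-- what changed: B precomputes a longest-common-prefix table lcp[p] = lcp(s, s[p:]) once in O(n^2), then answers each prefix=suffix test in O(1) as lcp[i+1-k] >= k, instead of A's per-position while-loop that builds and compares slices (an O(n) list comparison inside two nested loops).
import Mathlib
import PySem

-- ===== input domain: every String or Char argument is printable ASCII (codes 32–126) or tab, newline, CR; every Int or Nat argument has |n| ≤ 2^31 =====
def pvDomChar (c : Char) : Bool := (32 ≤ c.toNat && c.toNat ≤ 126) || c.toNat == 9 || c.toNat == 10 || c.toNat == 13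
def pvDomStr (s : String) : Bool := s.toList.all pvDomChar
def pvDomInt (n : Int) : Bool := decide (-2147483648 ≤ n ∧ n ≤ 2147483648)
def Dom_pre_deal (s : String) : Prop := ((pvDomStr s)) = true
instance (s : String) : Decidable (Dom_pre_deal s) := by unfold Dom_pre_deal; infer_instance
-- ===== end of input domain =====

-- B replaces A's slice-comparing inner while-loop by a precomputed lcp table, so each
-- prefix=suffix test is an O(1) lookup: O(n^2) total instead of A's O(n^3).

-- ===== PORT A =====
-- the inner 'while l < len(_sub)-1: if _sub[:l+1] == _sub[r:] … else break' loop (fuel = totality device)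
def pvWhileA (sub : List Char) (count l r : Int) : Nat → Int
  | 0 => count
  | fuel+1 =>
    if l < (sub.length : Int) - 1 then
      if PySem.List.slice sub none (some (l+1)) = PySem.List.slice sub (some r) none then
        pvWhileA sub (count+1) (l+1) (r-1) fuel
      else count
    else count

def pre_deal (s : String) : List Int :=
  let sl := s.toList
  let res : List Int := List.replicate sl.length 0          -- _res = [0] * len(s)
  (PySem.List.pyRange 1 (sl.length : Int) 1).foldl (fun res i =>
    let sub := PySem.List.slice sl none (some (i+1))        -- _sub = s[:i+1]
    PySem.List.pySetD res i (pvWhileA sub 0 0 ((sub.length : Int) - 1) sub.length)) res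

-- ===== PORT B =====
-- 't = 0; while p + t < n and s[t] == s[p+t]: t += 1' (fuel = totality device)
def pvLcpLoop (sl : List Char) (n p t : Int) : Nat → Int
  | 0 => t
  | fuel+1 =>
    if p + t < n ∧ PySem.List.pyGetD sl t ' ' = PySem.List.pyGetD sl (p+t) ' ' then
      pvLcpLoop sl n p (t+1) fuel
    else t

-- 'k = 1; while k <= i and lcp[i+1-k] >= k: k += 1; return k-1'
def pvKLoop (lcp : List Int) (i k : Int) : Nat → Int
  | 0 => k - 1
  | fuel+1 =>
    if k ≤ i ∧ k ≤ PySem.List.pyGetD lcp (i+1-k) 0 then pvKLoop lcp i (k+1) fuel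
    else k - 1

def pre_deal_alt (s : String) : List Int :=
  let sl := s.toList
  let n : Int := sl.length
  let lcp : List Int := (PySem.List.pyRange 0 n 1).foldl
    (fun acc p => acc ++ [pvLcpLoop sl n p 0 sl.length]) []     -- lcp.append(t)
  let res : List Int := List.replicate sl.length 0              -- res = [0] * n
  (PySem.List.pyRange 1 n 1).foldl (fun res i =>
    PySem.List.pySetD res i (pvKLoop lcp i 1 ((i+1).toNat))) res

-- ===== PRECONDITION & SPEC =====
def Spec_pre_deal (s : String) (out : List Int) : Prop := out = pre_deal_alt s
instance (s : String) (out : List Int) : Decidable (Spec_pre_deal s out) := by unfold Spec_pre_deal; infer_instance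

-- ===== CLAIM (what is proved, stated in full; the proofs are below) =====
def Claim_equal_pre_deal : Prop := ∀ (s : String), Dom_pre_deal s → Spec_pre_deal s (pre_deal s)

-- ===== LEMMAS AND PROOFS =====

-- mathematical longest common prefix (proof-side characterisation of B's table entries)
def lcpN : List Char → List Char → Nat
  | a::as, b::bs => if a = b then lcpN as bs + 1 else 0
  | _, _ => 0

lemma lcpN_nil_right (xs : List Char) : lcpN xs [] = 0 := by cases xs <;> rfl

lemma lcpN_ge_iff (k : Nat) (xs ys : List Char) :
    k ≤ lcpN xs ys ↔ k ≤ xs.length ∧ xs.take k = ys.take k := by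
  induction xs generalizing ys k with
  | nil =>
    cases k with
    | zero => simp [lcpN]
    | succ k => cases ys <;> simp [lcpN]
  | cons a as ih =>
    cases ys with
    | nil =>
      cases k with
      | zero => simp
      | succ k => simp [lcpN_nil_right]
    | cons b bs =>
      cases k with
      | zero => simp
      | succ k =>
        by_cases hab : a = b
        · subst hab
          have h : lcpN (a::as) (a::bs) = lcpN as bs + 1 := by simp [lcpN]
          simp only [h, List.length_cons, List.take_succ_cons, List.cons.injEq, true_and,
            Nat.add_le_add_iff_right]
          exact ih k bs
        · simp [lcpN, hab]

lemma pvLcpLoop_eq (sl : List Char) (p : Nat) :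
    ∀ (fuel t : Nat), sl.length ≤ fuel + p + t →
      pvLcpLoop sl (sl.length : Int) (p : Int) (t : Int) fuel
        = ((t + lcpN (sl.drop t) (sl.drop (p+t)) : Nat) : Int) := by
  intro fuel
  induction fuel with
  | zero =>
    intro t ht
    have h1 : sl.drop (p+t) = [] := List.drop_eq_nil_of_le (by omega)
    simp [pvLcpLoop, h1, lcpN_nil_right]
  | succ fuel ih =>
    intro t ht
    by_cases hlt : p + t < sl.length
    · have ht' : t < sl.length := by omega
      have hdt : sl.drop t = sl[t] :: sl.drop (t+1) := List.drop_eq_getElem_cons ht'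
      have hdpt : sl.drop (p+t) = sl[p+t] :: sl.drop (p+t+1) := List.drop_eq_getElem_cons hlt
      have hg1 : PySem.List.pyGetD sl (t : Int) ' ' = sl[t] := by
        rw [PySem.List.pyGetD_natCast]; exact List.getD_eq_getElem sl ' ' ht'
      have hg2 : PySem.List.pyGetD sl ((p:Int)+(t:Int)) ' ' = sl[p+t] := by
        rw [show ((p:Int)+(t:Int)) = ((p+t : Nat) : Int) by push_cast; ring,
          PySem.List.pyGetD_natCast]
        exact List.getD_eq_getElem sl ' ' hlt
      by_cases hc : sl[t] = sl[p+t]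
      · have hcond : ((p:Int) + (t:Int) < (sl.length : Int) ∧
            PySem.List.pyGetD sl (t : Int) ' ' = PySem.List.pyGetD sl ((p:Int)+(t:Int)) ' ') := by
          refine ⟨by exact_mod_cast hlt, by rw [hg1, hg2, hc]⟩
        rw [pvLcpLoop, if_pos hcond,
          show (t:Int)+1 = ((t+1 : Nat) : Int) by push_cast; ring,
          ih (t+1) (by omega)]
        have : lcpN (sl.drop t) (sl.drop (p+t)) = lcpN (sl.drop (t+1)) (sl.drop (p+(t+1))) + 1 := by
          rw [hdt, hdpt, show p+t+1 = p+(t+1) by ring] at *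
          simp [lcpN, hc]
        rw [this]; push_cast; ring
      · have hlcp0 : lcpN (sl.drop t) (sl.drop (p+t)) = 0 := by
          rw [hdt, hdpt]; simp [lcpN, hc]
        rw [pvLcpLoop]
        rw [if_neg (by rw [hg1, hg2]; tauto), hlcp0]
        simp
    · have h1 : sl.drop (p+t) = [] := List.drop_eq_nil_of_le (by omega)
      rw [pvLcpLoop, if_neg (by omega), h1, lcpN_nil_right]
      simp

lemma lcp_table (sl : List Char) (p : Nat) (hp : p < sl.length) :
    PySem.List.pyGetD
      ((PySem.List.pyRange 0 (sl.length : Int) 1).foldl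
        (fun acc q => acc ++ [pvLcpLoop sl (sl.length : Int) q 0 sl.length]) [])
      (p : Int) 0 = ((lcpN sl (sl.drop p) : Nat) : Int) := by
  rw [PySem.List.pyRange_zero_nat, PySem.List.foldl_append_singleton_eq_map, List.nil_append,
    List.map_map, PySem.List.pyGetD_natCast,
    PySem.List.getD_map_range _ _ _ _ (by simpa using hp)]
  have := pvLcpLoop_eq sl p sl.length 0 (by omega)
  simpa using this

-- prefix=suffix test of A (on _sub = s[:i+1]) ↔ lcp-table test of B
lemma cond_iff (sl : List Char) (i k : Nat) (h1 : 1 ≤ k) (h2 : k ≤ i) (h3 : i < sl.length) :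
    ((sl.take (i+1)).take k = (sl.take (i+1)).drop (i+1-k)) ↔
      k ≤ lcpN sl (sl.drop (i+1-k)) := by
  rw [List.take_take, Nat.min_eq_left (by omega), List.drop_take,
    show i+1-(i+1-k) = k by omega, lcpN_ge_iff]
  constructor
  · intro h; exact ⟨by omega, h⟩
  · intro h; exact h.2

lemma loop_eq (sl : List Char) (i : Nat) (hin : i < sl.length) (lcp : List Int)
    (hlcp : ∀ p : Nat, p < sl.length → PySem.List.pyGetD lcp (p : Int) 0 = ((lcpN sl (sl.drop p) : Nat) : Int)) :
    ∀ (fuel c : Nat), c ≤ i →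
      pvWhileA (sl.take (i+1)) (c : Int) (c : Int) ((i : Int) - (c : Int)) fuel
        = pvKLoop lcp (i : Int) ((c : Int) + 1) fuel := by
  intro fuel
  have hlen : (sl.take (i+1)).length = i+1 := by
    rw [List.length_take]; omega
  induction fuel with
  | zero => intro c _; simp [pvWhileA, pvKLoop]
  | succ fuel ih =>
    intro c hc
    by_cases hci : c < i
    · -- both guards' first part hold
      have hA : (c : Int) < ((sl.take (i+1)).length : Int) - 1 := by
        rw [hlen]; push_cast; omega
      have hik : (i : Int) + 1 - ((c:Int)+1) = ((i - c : Nat) : Int) := by omega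
      have hlk : PySem.List.pyGetD lcp ((i:Int)+1-((c:Int)+1)) 0
          = ((lcpN sl (sl.drop (i-c)) : Nat) : Int) := by
        rw [hik, hlcp (i-c) (by omega)]
      have hsl1 : PySem.List.slice (sl.take (i+1)) none (some ((c:Int)+1))
          = (sl.take (i+1)).take (c+1) := by
        rw [show (c:Int)+1 = ((c+1:Nat):Int) by push_cast; ring]
        exact PySem.List.slice_to_natCast _ _
      have hsl2 : PySem.List.slice (sl.take (i+1)) (some ((i:Int)-(c:Int))) none
          = (sl.take (i+1)).drop (i-c) := by
        rw [show (i:Int)-(c:Int) = ((i-c:Nat):Int) by omega]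
        exact PySem.List.slice_from_natCast _ _
      have hcnd := cond_iff sl i (c+1) (by omega) (by omega) hin
      rw [show i+1-(c+1) = i-c from by omega] at hcnd
      by_cases hm : (sl.take (i+1)).take (c+1) = (sl.take (i+1)).drop (i-c)
      · have hBc : ((c:Int)+1 ≤ (i:Int) ∧
            (c:Int)+1 ≤ PySem.List.pyGetD lcp ((i:Int)+1-((c:Int)+1)) 0) := by
          refine ⟨by omega, ?_⟩
          rw [hlk]
          have := hcnd.mp hm
          omega
        rw [pvWhileA, if_pos hA, if_pos (by rw [hsl1, hsl2]; exact hm),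
          pvKLoop, if_pos hBc]
        have := ih (c+1) (by omega)
        push_cast at this
        rw [show (i:Int) - (c:Int) - 1 = (i:Int) - ((c:Int)+1) from by ring]
        exact this
      · have hBc : ¬((c:Int)+1 ≤ (i:Int) ∧
            (c:Int)+1 ≤ PySem.List.pyGetD lcp ((i:Int)+1-((c:Int)+1)) 0) := by
          rw [hlk]
          intro h
          exact hm (hcnd.mpr (by exact_mod_cast h.2))
        rw [pvWhileA, if_pos hA, if_neg (by rw [hsl1, hsl2]; exact hm),
          pvKLoop, if_neg hBc]
        ring
    · have hA : ¬((c : Int) < ((sl.take (i+1)).length : Int) - 1) := by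
        rw [hlen]; push_cast; omega
      have hB : ¬((c:Int)+1 ≤ (i:Int) ∧
          (c:Int)+1 ≤ PySem.List.pyGetD lcp ((i:Int)+1-((c:Int)+1)) 0) := by
        intro h
        have := h.1
        push_cast at this; omega
      rw [pvWhileA, if_neg hA, pvKLoop, if_neg hB]
      ring

-- ===== VERDICT (by name: the statement is the Claim_ definition above) =====
theorem pre_deal_spec : Claim_equal_pre_deal := by
  intro s _
  unfold Spec_pre_deal pre_deal pre_deal_alt
  set sl := s.toList with hsl
  apply PySem.List.foldl_congr_mem
  intro acc x hx
  rw [PySem.List.mem_pyRange_one] at hx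
  obtain ⟨hx1, hx2⟩ := hx
  have hi0 : 0 ≤ x := by omega
  set i : Nat := x.toNat with hi
  have hxi : x = (i : Int) := (Int.toNat_of_nonneg hi0).symm
  have hi1 : 1 ≤ i := by omega
  have hin : i < sl.length := by omega
  have hsub : PySem.List.slice sl none (some (x+1)) = sl.take (i+1) := by
    rw [hxi, show (i:Int)+1 = ((i+1:Nat):Int) by push_cast; ring]
    exact PySem.List.slice_to_natCast _ _
  have hlen : (sl.take (i+1)).length = i+1 := by rw [List.length_take]; omega
  have := loop_eq sl i hin _ (fun p hp => lcp_table sl p hp) (i+1) 0 (by omega)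
  rw [hsub]
  dsimp only
  rw [hlen, hxi, show ((i:Int)+1).toNat = i+1 from by omega,
    show (((i:Nat)+1 : Nat):Int) - 1 = (i:Int) from by push_cast; ring]
  simp only [Nat.cast_zero, sub_zero, zero_add] at this
  exact congrArg (fun v => PySem.List.pySetD acc (i : Int) v) this
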